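-- pv_equiv track=rewrite | github.com/OkaDarmayasa/review | app.py | combine_nya_with_previous
-- ===== SOURCE A (Python) =====
-- def combine_nya_with_previous(text):
--     words = text.split()
--     combined_text = []
--     i = 0
--     while i < len(words):
--         if words[i] == 'nya' and i > 0:
--             combined_text[-1] += 'nya'  # Combine "nya" with the previous word
--         else:
--             combined_text.append(words[i])
--         i += 1
--     return ' '.join(combined_text)
-- ===== SOURCE B (Python) =====
-- def combine_nya_with_previous(text):
--     # Reverse run-length pass: count consecutive 'nya' tokens and attach the
--     # whole run to the preceding word at once; leading runs become one token.
--     parts = []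
--     run = 0
--     for w in reversed(text.split()):
--         if w == 'nya':
--             run += 1
--         else:
--             parts.append(w + 'nya' * run)
--             run = 0
--     if run:
--         parts.append('nya' * run)
--     parts.reverse()
--     return ' '.join(parts)
-- ===== Notes on version B (the rewrite author's own statement) =====
-- stated objective: alternative
-- what changed: Replaces the forward index loop that mutates the last element of the result list with a single reverse run-length pass: consecutive 'nya' tokens are counted and attached to the preceding word in one concatenation (a leading run becomes its own token), then the collected parts are reversed and joined.
import Mathlib
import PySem

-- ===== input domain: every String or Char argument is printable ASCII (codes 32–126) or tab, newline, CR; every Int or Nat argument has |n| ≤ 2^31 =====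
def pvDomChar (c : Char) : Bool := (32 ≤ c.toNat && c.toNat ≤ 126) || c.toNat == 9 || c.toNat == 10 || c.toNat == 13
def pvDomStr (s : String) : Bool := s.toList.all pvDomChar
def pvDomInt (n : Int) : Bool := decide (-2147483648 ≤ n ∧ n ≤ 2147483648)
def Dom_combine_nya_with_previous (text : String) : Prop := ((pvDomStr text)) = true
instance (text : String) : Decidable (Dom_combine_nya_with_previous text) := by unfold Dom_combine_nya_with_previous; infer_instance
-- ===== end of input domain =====

-- B replaces A's forward index loop (mutating the last result element) by a reverse
-- run-length pass; alternative structure, same cost. Equal output proved on all inputs.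

-- ===== PORT A =====
-- combined_text[-1] += 'nya' : append "nya" to the last element (list is
-- nonempty whenever this branch runs, since i > 0; on [] this returns []).
def pvAddNyaLast : List String → List String
  | [] => []
  | [x] => [x ++ "nya"]
  | x :: xs => x :: pvAddNyaLast xs

-- the 'while i < len(words)' loop: structural recursion over the remaining words,
-- carrying the index i and the accumulator combined_text
def pvALoop : List String → Nat → List String → List String
  | [], _, acc => acc
  | w :: rest, i, acc =>
    if w = "nya" ∧ i > 0 then pvALoop rest (i + 1) (pvAddNyaLast acc)
    else pvALoop rest (i + 1) (acc ++ [w])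

def combine_nya_with_previous (text : String) : String :=
  PySem.Str.join " " (pvALoop (PySem.Str.split₀ text) 0 [])

-- ===== PORT B =====
-- 'nya' * run
def pvRep (s : String) : Nat → String
  | 0 => ""
  | n + 1 => s ++ pvRep s n

-- the 'for w in reversed(words)' loop: carries (parts, run)
def pvBLoop : List String → Nat → List String → List String × Nat
  | [], run, parts => (parts, run)
  | w :: rest, run, parts =>
    if w = "nya" then pvBLoop rest (run + 1) parts
    else pvBLoop rest 0 (parts ++ [w ++ pvRep "nya" run])

def combine_nya_with_previous_alt (text : String) : String :=
  let p := pvBLoop (PySem.Str.split₀ text).reverse 0 []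
  let parts := if p.2 ≠ 0 then p.1 ++ [pvRep "nya" p.2] else p.1
  PySem.Str.join " " parts.reverse

-- ===== PRECONDITION & SPEC =====
def Spec_combine_nya_with_previous (text : String) (out : String) : Prop := out = combine_nya_with_previous_alt text
instance (text : String) (out : String) : Decidable (Spec_combine_nya_with_previous text out) := by unfold Spec_combine_nya_with_previous; infer_instance

-- ===== CLAIM (what is proved, stated in full; the proofs are below) =====
def Claim_equal_combine_nya_with_previous : Prop := ∀ (text : String), Dom_combine_nya_with_previous text → Spec_combine_nya_with_previous text (combine_nya_with_previous text)

-- ===== LEMMAS AND PROOFS =====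

-- mid-level specification: merge words from the front
def pvGo (cur : String) : List String → List String
  | [] => [cur]
  | w :: ws => if w = "nya" then pvGo (cur ++ "nya") ws else cur :: pvGo w ws

def pvF : List String → List String
  | [] => []
  | w :: ws => pvGo w ws

-- attach n copies of "nya" to the last token (n copies as their own token if empty)
def pvTail : List String → Nat → List String
  | [], n => if n ≠ 0 then [pvRep "nya" n] else []
  | [x], n => [x ++ pvRep "nya" n]
  | x :: y :: xs, n => x :: pvTail (y :: xs) n

theorem pvRep_one (s : String) : pvRep s 1 = s := by
  simp [pvRep]

theorem pvGo_ne_nil (ws : List String) (cur : String) : pvGo cur ws ≠ [] := by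
  induction ws generalizing cur with
  | nil => simp [pvGo]
  | cons w t ih => simp only [pvGo]; split <;> simp [ih]

theorem pvTail_zero (ts : List String) : pvTail ts 0 = ts := by
  induction ts with
  | nil => simp [pvTail]
  | cons x xs ih =>
    cases xs with
    | nil => simp [pvTail, pvRep]
    | cons y ys => simp [pvTail, ih]

theorem pvTail_cons (c : String) (ts : List String) (n : Nat) (h : ts ≠ []) :
    pvTail (c :: ts) n = c :: pvTail ts n := by
  cases ts with
  | nil => exact absurd rfl h
  | cons y ys => rfl

theorem pvTail_one_ne_nil (ts : List String) : pvTail ts 1 ≠ [] := by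
  cases ts with
  | nil => simp [pvTail]
  | cons x xs => cases xs <;> simp [pvTail]

theorem pvTail_tail (ts : List String) (n : Nat) :
    pvTail (pvTail ts 1) n = pvTail ts (n + 1) := by
  induction ts with
  | nil =>
    simp only [pvTail, pvRep_one]
    cases n with
    | zero => simp [pvTail, pvRep]
    | succ m => simp [pvTail, pvRep]
  | cons x xs ih =>
    cases xs with
    | nil => simp [pvTail, pvRep, String.append_assoc]
    | cons y ys =>
      rw [pvTail_cons x (y :: ys) 1 (by simp),
          pvTail_cons x (pvTail (y :: ys) 1) n (pvTail_one_ne_nil _),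
          pvTail_cons x (y :: ys) (n + 1) (by simp), ih]

theorem pvTail_snoc (ts : List String) (c : String) (n : Nat) :
    pvTail (ts ++ [c]) n = ts ++ [c ++ pvRep "nya" n] := by
  induction ts with
  | nil => rfl
  | cons x xs ih =>
    rw [List.cons_append, pvTail_cons x (xs ++ [c]) n (by simp), ih, List.cons_append]

theorem pvGo_snoc_nya (ws : List String) (cur : String) :
    pvGo cur (ws ++ ["nya"]) = pvTail (pvGo cur ws) 1 := by
  induction ws generalizing cur with
  | nil => simp [pvGo, pvTail, pvRep_one]
  | cons w t ih =>
    simp only [List.cons_append, pvGo]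
    split
    · exact ih _
    · rw [ih, pvTail_cons _ _ _ (pvGo_ne_nil _ _)]

theorem pvGo_snoc_other (ws : List String) (cur w : String) (h : w ≠ "nya") :
    pvGo cur (ws ++ [w]) = pvGo cur ws ++ [w] := by
  induction ws generalizing cur with
  | nil => simp [pvGo, h]
  | cons v t ih =>
    simp only [List.cons_append, pvGo]
    split <;> simp [ih]

theorem pvF_snoc_nya (ws : List String) : pvF (ws ++ ["nya"]) = pvTail (pvF ws) 1 := by
  cases ws with
  | nil => simp [pvF, pvGo, pvTail, pvRep_one]
  | cons w t => simpa [pvF] using pvGo_snoc_nya t w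

theorem pvF_snoc_other (ws : List String) (w : String) (h : w ≠ "nya") :
    pvF (ws ++ [w]) = pvF ws ++ [w] := by
  cases ws with
  | nil => simp [pvF, pvGo]
  | cons v t => simpa [pvF] using pvGo_snoc_other t v w h

theorem pvAddNyaLast_snoc (pre : List String) (c : String) :
    pvAddNyaLast (pre ++ [c]) = pre ++ [c ++ "nya"] := by
  induction pre with
  | nil => rfl
  | cons x xs ih =>
    cases xs with
    | nil => rfl
    | cons y ys => simpa [pvAddNyaLast] using ih

theorem pvALoop_go (ws : List String) (pre : List String) (cur : String) (i : Nat) :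
    pvALoop ws (i + 1) (pre ++ [cur]) = pre ++ pvGo cur ws := by
  induction ws generalizing pre cur i with
  | nil => simp [pvALoop, pvGo]
  | cons w t ih =>
    simp only [pvALoop, pvGo]
    by_cases hw : w = "nya"
    · simp only [hw, true_and, if_pos (Nat.succ_pos i),
        pvAddNyaLast_snoc]
      exact ih pre (cur ++ "nya") (i + 1)
    · rw [if_neg (by simp [hw]), if_neg hw,
          ih (pre ++ [cur]) w (i + 1), List.append_assoc]
      rfl

theorem pvALoop_eq_pvF (ws : List String) : pvALoop ws 0 [] = pvF ws := by
  cases ws with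
  | nil => rfl
  | cons w t =>
    have : pvALoop (w :: t) 0 [] = pvALoop t 1 ([] ++ [w]) := by
      simp [pvALoop]
    rw [this, pvALoop_go t [] w 0]
    rfl

theorem pvBLoop_acc (l : List String) (run : Nat) (parts : List String) :
    pvBLoop l run parts =
      (parts ++ (pvBLoop l run []).1, (pvBLoop l run []).2) := by
  induction l generalizing run parts with
  | nil => simp [pvBLoop]
  | cons w t ih =>
    simp only [pvBLoop]
    split
    · exact ih _ _
    · rw [ih 0 (parts ++ [w ++ pvRep "nya" run]), ih 0 ([] ++ [w ++ pvRep "nya" run])]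
      simp

-- the parts list B produces from the reversed list l, before the final reverse
def pvK (l : List String) (run : Nat) : List String :=
  let p := pvBLoop l run []
  if p.2 ≠ 0 then p.1 ++ [pvRep "nya" p.2] else p.1

theorem pvK_eq (l : List String) (run : Nat) :
    (pvK l run).reverse = pvTail (pvF l.reverse) run := by
  induction l generalizing run with
  | nil =>
    simp only [pvK, pvBLoop, List.reverse_nil, pvF, pvTail]
    split <;> simp
  | cons x l' ih =>
    by_cases hx : x = "nya"
    · have hK : pvK (x :: l') run = pvK l' (run + 1) := by
        simp [pvK, pvBLoop, hx]
      rw [hK, ih, List.reverse_cons, hx, pvF_snoc_nya, pvTail_tail]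
    · have hK : pvK (x :: l') run = [x ++ pvRep "nya" run] ++ pvK l' 0 := by
        simp only [pvK, pvBLoop, if_neg hx]
        rw [pvBLoop_acc l' 0 ([] ++ [x ++ pvRep "nya" run])]
        simp only [List.nil_append]
        split <;> simp
      rw [hK, List.reverse_append, ih, pvTail_zero, List.reverse_cons (a := x) (as := l'), pvF_snoc_other _ _ hx,
          pvTail_snoc]
      simp

-- ===== VERDICT (by name: the statement is the Claim_ definition above) =====
theorem combine_nya_with_previous_spec : Claim_equal_combine_nya_with_previous := by
  intro text _
  unfold Spec_combine_nya_with_previous combine_nya_with_previous combine_nya_with_previous_alt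
  have h := pvK_eq (PySem.Str.split₀ text).reverse 0
  rw [List.reverse_reverse] at h
  simp only [pvK] at h
  rw [pvALoop_eq_pvF, ← pvTail_zero (pvF (PySem.Str.split₀ text)), ← h]
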